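-- pv_equiv track=rewrite | github.com/katoro8989/ShinkaEvolve_for_timimg_attack | results_20251223_024627/gen_89/original.py | secure_compare
-- ===== SOURCE A (Python) =====
-- def secure_compare(secret: str, input_val: str) -> bool:
--     """
--     Constant-time comparison of two strings.
--     This version avoids early returns and operates in a no-branch style
--     by processing characters in a non-branching manner, ensuring consistent
--     timing regardless of mismatches.
--     """
--     len_s = len(secret)
--     len_i = len(input_val)
--     max_len = max(len_s, len_i)
--
--     result = len_s ^ len_i  # Start with length difference
--
--     for i in range(max_len):
--         a = ord(secret[i]) if i < len_s else 0
--         b = ord(input_val[i]) if i < len_i else 0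
--         result |= (a ^ b)
--
--     return result == 0
--
--     return True
-- ===== SOURCE B (Python) =====
-- def secure_compare(secret: str, input_val: str) -> bool:
--     # Direct comparison: the XOR/OR accumulator in A is zero iff the
--     # lengths match and every character matches, i.e. iff the strings
--     # are equal. (Note: B is not constant-time; equivalence is on the
--     # return value only.)
--     return secret == input_val
-- ===== Notes on version B (the rewrite author's own statement) =====
-- stated objective: simpler
-- what changed: Replaced the length-XOR plus per-character XOR/OR accumulation loop by the single native equality `secret == input_val`, which returns the same boolean (the accumulator is zero iff the strings are equal); B drops A's constant-time property, which only affects timing, not the value.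
import Mathlib
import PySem

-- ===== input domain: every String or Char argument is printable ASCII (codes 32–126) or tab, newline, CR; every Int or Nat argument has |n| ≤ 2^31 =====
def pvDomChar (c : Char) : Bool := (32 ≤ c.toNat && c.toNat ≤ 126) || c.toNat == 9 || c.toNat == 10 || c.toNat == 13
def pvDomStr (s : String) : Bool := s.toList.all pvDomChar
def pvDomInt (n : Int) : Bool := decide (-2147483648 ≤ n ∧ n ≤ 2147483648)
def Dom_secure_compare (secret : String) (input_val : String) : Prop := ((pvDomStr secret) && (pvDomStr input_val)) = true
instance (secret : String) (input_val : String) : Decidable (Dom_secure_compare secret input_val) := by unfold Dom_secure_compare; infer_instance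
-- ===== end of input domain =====

-- B replaces A's XOR/OR accumulation loop with a direct equality test; equal return value, B is not constant-time (timing only, not observable in the result).

-- ===== PORT A =====
def secure_compare (secret : String) (input_val : String) : Bool :=
  let s := secret.toList
  let t := input_val.toList
  let len_s : Int := s.length
  let len_i : Int := t.length
  let max_len : Int := max len_s len_i
  let result : Int :=
    (PySem.List.pyRange 0 max_len 1).foldl (fun r i =>
      let a : Int := if i < len_s then ((PySem.List.pyGet? s i).map (fun c => (c.toNat : Int))).getD 0 else 0
      let b : Int := if i < len_i then ((PySem.List.pyGet? t i).map (fun c => (c.toNat : Int))).getD 0 else 0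
      PySem.Int.bor r (PySem.Int.bxor a b))
      (PySem.Int.bxor len_s len_i)
  decide (result = 0)

-- ===== PORT B =====
def secure_compare_alt (secret : String) (input_val : String) : Bool :=
  secret == input_val

-- ===== PRECONDITION & SPEC =====
def Spec_secure_compare (secret : String) (input_val : String) (out : Bool) : Prop := out = secure_compare_alt secret input_val
instance (secret : String) (input_val : String) (out : Bool) : Decidable (Spec_secure_compare secret input_val out) := by unfold Spec_secure_compare; infer_instance

-- ===== CLAIM (what is proved, stated in full; the proofs are below) =====
def Claim_equal_secure_compare : Prop := ∀ (secret : String) (input_val : String), Dom_secure_compare secret input_val → Spec_secure_compare secret input_val (secure_compare secret input_val)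

-- ===== LEMMAS AND PROOFS =====

-- The OR-fold is zero iff the seed is zero and every contributed term is zero.
theorem bor_fold_eq_zero (l : List Int) (f : Int → Int) (r : Int)
    (hr : 0 ≤ r) (hf : ∀ i ∈ l, 0 ≤ f i) :
    (l.foldl (fun r i => PySem.Int.bor r (f i)) r = 0 ↔
      r = 0 ∧ ∀ i ∈ l, f i = 0) := by
  induction l generalizing r with
  | nil => simp
  | cons x xs ih =>
    simp only [List.foldl_cons]
    have hfx : 0 ≤ f x := hf x (by simp)
    have hbor : 0 ≤ PySem.Int.bor r (f x) := by
      rw [PySem.Int.bor_of_nonneg hr hfx]; exact Int.natCast_nonneg _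
    rw [ih _ hbor (fun i hi => hf i (List.mem_cons_of_mem _ hi))]
    constructor
    · rintro ⟨h0, hrest⟩
      rw [PySem.Int.bor_of_nonneg hr hfx] at h0
      have : r.toNat ||| (f x).toNat = 0 := by exact_mod_cast h0
      have h1 := Nat.left_le_or (n := r.toNat) (m := (f x).toNat)
      have h2 := Nat.right_le_or (n := r.toNat) (m := (f x).toNat)
      have hr0 : r.toNat = 0 ∧ (f x).toNat = 0 := by omega
      refine ⟨by omega, ?_⟩
      intro i hi
      rcases List.mem_cons.mp hi with h | h
      · subst h; omega
      · exact hrest i h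
    · rintro ⟨h0, hall⟩
      have hx0 : f x = 0 := hall x (by simp)
      refine ⟨by simp [h0, hx0, PySem.Int.bor_zero], fun i hi => hall i (List.mem_cons_of_mem _ hi)⟩

theorem xor_eq_zero_iff (a b : Int) (ha : 0 ≤ a) (hb : 0 ≤ b) :
    PySem.Int.bxor a b = 0 ↔ a = b := by
  rw [PySem.Int.bxor_of_nonneg ha hb]
  constructor
  · intro h
    have : a.toNat ^^^ b.toNat = 0 := by exact_mod_cast h
    have := Nat.xor_eq_zero_iff.mp this
    omega
  · intro h; subst h; simp

theorem secure_compare_eq_decide (secret input_val : String) :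
    secure_compare secret input_val = decide (secret.toList = input_val.toList) := by
  unfold secure_compare
  set s := secret.toList with hs
  set t := input_val.toList with ht
  simp only []
  have key :
      (PySem.List.pyRange 0 (max (s.length : Int) (t.length : Int)) 1).foldl
        (fun r i =>
          PySem.Int.bor r (PySem.Int.bxor
            (if i < (s.length : Int) then ((PySem.List.pyGet? s i).map (fun c => (c.toNat : Int))).getD 0 else 0)
            (if i < (t.length : Int) then ((PySem.List.pyGet? t i).map (fun c => (c.toNat : Int))).getD 0 else 0)))
        (PySem.Int.bxor (s.length : Int) (t.length : Int)) = 0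
      ↔ s = t := by
    set fa := fun i => (if i < (s.length : Int) then ((PySem.List.pyGet? s i).map (fun c => (c.toNat : Int))).getD 0 else 0 : Int) with hfa
    set fb := fun i => (if i < (t.length : Int) then ((PySem.List.pyGet? t i).map (fun c => (c.toNat : Int))).getD 0 else 0 : Int) with hfb
    have hnn : ∀ (f : Int → Int), (f = fa ∨ f = fb) → ∀ i, 0 ≤ f i := by
      rintro f (rfl | rfl) i <;>
        · simp only [hfa, hfb]
          split
          · cases h : PySem.List.pyGet? _ i <;> simp
          · exact le_refl 0
    rw [bor_fold_eq_zero _ _ _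
      (by rw [PySem.Int.bxor_of_nonneg (Int.natCast_nonneg _) (Int.natCast_nonneg _)]; exact Int.natCast_nonneg _)
      (fun i _ => by
        rw [PySem.Int.bxor_of_nonneg (hnn fa (Or.inl rfl) i) (hnn fb (Or.inr rfl) i)]
        exact Int.natCast_nonneg _)]
    rw [xor_eq_zero_iff _ _ (Int.natCast_nonneg _) (Int.natCast_nonneg _)]
    constructor
    · rintro ⟨hlen, hall⟩
      have hlen' : s.length = t.length := by exact_mod_cast hlen
      apply List.ext_getElem hlen'
      intro n h1 h2
      have hn : (n : Int) ∈ PySem.List.pyRange 0 (max (s.length : Int) (t.length : Int)) 1 := by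
        rw [PySem.List.mem_pyRange_one]
        constructor
        · exact Int.natCast_nonneg _
        · exact lt_max_of_lt_left (by exact_mod_cast h1)
      have := hall (n : Int) hn
      rw [xor_eq_zero_iff _ _ (hnn fa (Or.inl rfl) _) (hnn fb (Or.inr rfl) _)] at this
      simp only [hfa, hfb] at this
      rw [if_pos (by exact_mod_cast h1), if_pos (by exact_mod_cast h2)] at this
      rw [PySem.List.pyGet?_natCast, PySem.List.pyGet?_natCast,
          List.getElem?_eq_getElem h1, List.getElem?_eq_getElem h2] at this
      simp only [Option.map_some, Option.getD_some, Int.natCast_inj] at this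
      apply Char.ext
      exact UInt32.toNat_inj.mp this
    · intro hst
      rw [hst]
      exact ⟨rfl, fun i _ => PySem.Int.bxor_self _⟩
  exact decide_eq_decide.mpr key

-- ===== VERDICT (by name: the statement is the Claim_ definition above) =====
theorem secure_compare_spec : Claim_equal_secure_compare := by
  intro secret input_val _
  unfold Spec_secure_compare secure_compare_alt
  rw [secure_compare_eq_decide]
  rw [Bool.beq_eq_decide_eq]
  exact decide_eq_decide.mpr String.toList_inj
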